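-- pv_equiv track=rewrite | github.com/gunraj26/UBS_Team-Untitled | routes/operation_safeguard.py | decrypt_keyword
-- ===== SOURCE A (Python) =====
-- def decrypt_keyword(text, keyword):
--     """Keyword substitution cipher decryption"""
--     # Create alphabet with keyword first
--     keyword_chars = []
--     for char in keyword.upper():
--         if char not in keyword_chars:
--             keyword_chars.append(char)
--
--     # Add remaining alphabet characters
--     alphabet = keyword_chars + [chr(i) for i in range(ord('A'), ord('Z') + 1)
--                              if chr(i) not in keyword_chars]
--
--     # Create substitution mapping
--     substitution = {}
--     for i, char in enumerate(alphabet):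
--         substitution[char] = chr(ord('A') + i)
--
--     # Decrypt the text
--     result = ""
--     for char in text.upper():
--         if char in substitution:
--             result += substitution[char]
--         else:
--             result += char
--
--     return result
-- ===== SOURCE B (Python) =====
-- def decrypt_keyword(text, keyword):
--     """Keyword substitution cipher decryption"""
--     ks = []
--     for ch in keyword.upper():
--         if ch not in ks:
--             ks.append(ch)
--     k = len(ks)
--     out = []
--     for ch in text.upper():
--         if ch in ks:
--             out.append(chr(65 + ks.index(ch)))
--         elif 'A' <= ch <= 'Z':
--             below = sum(1 for x in ks if 'A' <= x < ch)
--             out.append(chr(65 + k + (ord(ch) - 65) - below))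
--         else:
--             out.append(ch)
--     return "".join(out)
-- ===== Notes on version B (the rewrite author's own statement) =====
-- stated objective: alternative
-- what changed: B never materializes the 26-entry cipher alphabet or the substitution dict: each character's plaintext is computed directly by index arithmetic (position in the deduplicated keyword, or len(keyword)+rank among the non-keyword letters).
import Mathlib
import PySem

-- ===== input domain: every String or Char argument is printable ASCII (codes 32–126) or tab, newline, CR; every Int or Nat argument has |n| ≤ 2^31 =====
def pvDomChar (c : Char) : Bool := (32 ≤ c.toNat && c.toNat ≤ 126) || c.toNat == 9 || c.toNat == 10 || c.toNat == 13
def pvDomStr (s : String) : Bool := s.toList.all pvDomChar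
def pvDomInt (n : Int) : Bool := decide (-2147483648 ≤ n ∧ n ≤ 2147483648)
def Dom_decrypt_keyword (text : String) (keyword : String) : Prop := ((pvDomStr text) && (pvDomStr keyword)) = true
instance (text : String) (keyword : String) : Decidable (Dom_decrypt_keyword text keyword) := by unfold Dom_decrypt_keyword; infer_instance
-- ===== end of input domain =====

-- B computes each output character by index arithmetic on the deduplicated keyword instead of
-- materializing A's 26-entry cipher alphabet and substitution dict (alternative decomposition).

-- ===== PORT A =====
-- literal port of A: dedup loop, alphabet comprehension, enumerate-built dict, per-char append loop
def decrypt_keyword (text : String) (keyword : String) : String :=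
  let keyword_chars : List Char :=
    (PySem.Str.upper keyword).toList.foldl
      (fun acc c => if acc.contains c then acc else acc ++ [c]) []
  let alphabet : List Char :=
    keyword_chars ++
      ((PySem.List.pyRange 65 91 1).filter
          (fun i => !keyword_chars.contains (Char.ofNat i.toNat))).map
        (fun i => Char.ofNat i.toNat)
  let substitution : PySem.Dict Char Char :=
    (PySem.List.enumerate alphabet 0).foldl
      (fun d p => d.insert p.2 (Char.ofNat ((65 : Int) + p.1).toNat)) PySem.Dict.empty
  -- substitution[char] is read under the 'char in substitution' guard, so get? is some there
  String.ofList
    ((PySem.Str.upper text).toList.foldl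
      (fun acc c =>
        if substitution.contains c then acc ++ [(substitution.get? c).getD c]
        else acc ++ [c]) [])

-- ===== PORT B =====
-- port of Source B: dedup loop, then per-character index arithmetic (no alphabet, no dict).
-- Python's char comparisons 'A' <= x < ch are codepoint comparisons, ported via Char.toNat;
-- sum(1 for x in ks if …) is List.countP; ks.index(ch) under the 'ch in ks' guard is index? with getD.
def decrypt_keyword_alt (text : String) (keyword : String) : String :=
  let ks : List Char :=
    (PySem.Str.upper keyword).toList.foldl
      (fun acc c => if acc.contains c then acc else acc ++ [c]) []
  let k := ks.length
  String.ofList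
    ((PySem.Str.upper text).toList.foldl
      (fun out c =>
        if ks.contains c then
          out ++ [Char.ofNat (65 + (PySem.List.index? ks c).getD 0)]
        else if 65 ≤ c.toNat ∧ c.toNat ≤ 90 then
          out ++ [Char.ofNat (65 + k + (c.toNat - 65) -
            ks.countP (fun x => decide (65 ≤ x.toNat) && decide (x.toNat < c.toNat)))]
        else out ++ [c]) [])

-- ===== PRECONDITION & SPEC =====
def Spec_decrypt_keyword (text : String) (keyword : String) (out : String) : Prop := out = decrypt_keyword_alt text keyword
instance (text : String) (keyword : String) (out : String) : Decidable (Spec_decrypt_keyword text keyword out) := by unfold Spec_decrypt_keyword; infer_instance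

-- ===== CLAIM (what is proved, stated in full; the proofs are below) =====
def Claim_equal_decrypt_keyword : Prop := ∀ (text : String) (keyword : String), Dom_decrypt_keyword text keyword → Spec_decrypt_keyword text keyword (decrypt_keyword text keyword)

-- ===== LEMMAS AND PROOFS =====

-- A's (and B's) dedup loop is dict.fromkeys-style dedup (PySem.List.dedup)
theorem pv_dedup_eq (l : List Char) :
    l.foldl (fun acc c => if acc.contains c then acc else acc ++ [c]) [] =
      PySem.List.dedup l := by
  simp only [PySem.List.dedup_eq_ofList, PySem.Set.ofList_eq_foldl]
  rfl

-- A's per-char append loop is a map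
theorem pv_loopA_map (d : PySem.Dict Char Char) (l acc : List Char) :
    l.foldl
        (fun acc c =>
          if d.contains c then acc ++ [(d.get? c).getD c] else acc ++ [c]) acc =
      acc ++ l.map (fun c => if d.contains c then (d.get? c).getD c else c) := by
  induction l generalizing acc with
  | nil => simp
  | cons c l ih =>
    simp only [List.foldl_cons, List.map_cons]
    by_cases h : d.contains c = true <;> simp [h, ih]

-- B's per-char append loop is a map
theorem pv_loopB_map (ks : List Char) (l acc : List Char) :
    l.foldl
        (fun out c =>
          if ks.contains c then
            out ++ [Char.ofNat (65 + (PySem.List.index? ks c).getD 0)]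
          else if 65 ≤ c.toNat ∧ c.toNat ≤ 90 then
            out ++ [Char.ofNat (65 + ks.length + (c.toNat - 65) -
              ks.countP (fun x => decide (65 ≤ x.toNat) && decide (x.toNat < c.toNat)))]
          else out ++ [c]) acc =
      acc ++ l.map (fun c =>
          if ks.contains c then Char.ofNat (65 + (PySem.List.index? ks c).getD 0)
          else if 65 ≤ c.toNat ∧ c.toNat ≤ 90 then
            Char.ofNat (65 + ks.length + (c.toNat - 65) -
              ks.countP (fun x => decide (65 ≤ x.toNat) && decide (x.toNat < c.toNat)))
          else c) := by
  induction l generalizing acc with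
  | nil => simp
  | cons c l ih =>
    simp only [List.foldl_cons, List.map_cons]
    by_cases h1 : ks.contains c = true
    · rw [if_pos h1, if_pos h1, ih]
      simp
    · by_cases h2 : 65 ≤ c.toNat ∧ c.toNat ≤ 90
      · rw [if_neg h1, if_neg h1, if_pos h2, if_pos h2, ih]
        simp
      · rw [if_neg h1, if_neg h1, if_neg h2, if_neg h2, ih]
        simp

theorem pv_char_toNat (m : Nat) (h : m < 55296) : (Char.ofNat m).toNat = m := by
  unfold Char.ofNat
  split
  · rfl
  · rename_i hv; exact absurd (Or.inl h) hv

theorem pv_ofNat_toNat (c : Char) (h : c.toNat < 55296) : Char.ofNat c.toNat = c := by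
  apply Char.ext
  apply UInt32.toNat_inj.mp
  exact pv_char_toNat c.toNat h

-- A's letter comprehension is filtering the letter list
theorem pv_letters (ks : List Char) :
    ((PySem.List.pyRange 65 91 1).filter (fun i => !ks.contains (Char.ofNat i.toNat))).map
        (fun i => Char.ofNat i.toNat) =
      ((List.range 26).map (fun k => Char.ofNat (65 + k))).filter (fun x => !ks.contains x) := by
  have hcast : ∀ k : Nat, ((65 : Int) + (k : Int)).toNat = 65 + k := by intro k; omega
  rw [PySem.List.pyRange_one]
  have h26 : ((91 : Int) - 65).toNat = 26 := rfl
  rw [h26, List.filter_map, List.filter_map, List.map_map]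
  have hpq : ∀ k ∈ List.range 26,
      ((fun i => !ks.contains (Char.ofNat i.toNat)) ∘ fun k : Nat => (65 : Int) + k) k =
      ((fun x => !ks.contains x) ∘ fun k : Nat => Char.ofNat (65 + k)) k := by
    intro k _
    simp only [Function.comp_apply, hcast k]
  rw [List.filter_congr hpq]
  apply List.map_congr_left
  intro k _
  simp only [Function.comp_apply, hcast k]

-- the substitution dict built from a duplicate-free alphabet, looked up
theorem pv_dict_items (alph : List Char) (hnd : alph.Nodup) :
    ((PySem.List.enumerate alph 0).foldl
        (fun d p => d.insert p.2 (Char.ofNat ((65 : Int) + p.1).toNat)) PySem.Dict.empty).items =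
      (PySem.List.enumerate alph 0).map
        (fun p => (p.2, Char.ofNat ((65 : Int) + p.1).toNat)) := by
  have h0 : (PySem.Dict.empty : PySem.Dict Char Char).items = [] := rfl
  have := PySem.Dict.items_foldl_insert_fresh (PySem.List.enumerate alph 0)
    (fun p => p.2) (fun p => Char.ofNat ((65 : Int) + p.1).toNat)
    PySem.Dict.empty
    (by intro a _; simp [PySem.Dict.contains_empty])
    (by rw [PySem.List.map_snd_enumerate]; exact hnd)
  rw [this, h0, List.nil_append]

theorem pv_dict_keys (alph : List Char) (hnd : alph.Nodup) :
    ((PySem.List.enumerate alph 0).foldl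
        (fun d p => d.insert p.2 (Char.ofNat ((65 : Int) + p.1).toNat)) PySem.Dict.empty).keys =
      alph := by
  simp only [PySem.Dict.keys, pv_dict_items alph hnd, List.map_map]
  have : ((fun p : Char × Char => p.1) ∘
      (fun p : Int × Char => (p.2, Char.ofNat ((65 : Int) + p.1).toNat))) =
      (fun p : Int × Char => p.2) := by funext p; rfl
  rw [this, PySem.List.map_snd_enumerate]

theorem pv_dict_get (alph : List Char) (hnd : alph.Nodup) (c : Char) :
    ((PySem.List.enumerate alph 0).foldl
        (fun d p => d.insert p.2 (Char.ofNat ((65 : Int) + p.1).toNat)) PySem.Dict.empty).get? c =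
      (PySem.List.index? alph c).map (fun i => Char.ofNat (65 + i)) := by
  cases hidx : PySem.List.index? alph c with
  | some i =>
    obtain ⟨hk, hget, -⟩ := PySem.List.getElem_of_index?_eq_some hidx
    have hmem : (c, Char.ofNat (65 + i)) ∈
        ((PySem.List.enumerate alph 0).foldl
          (fun d p => d.insert p.2 (Char.ofNat ((65 : Int) + p.1).toNat)) PySem.Dict.empty).items := by
      rw [pv_dict_items alph hnd]
      apply List.mem_map.mpr
      refine ⟨((0 : Int) + (i : Int), alph[i]), ?_, ?_⟩
      · exact (PySem.List.mem_enumerate_iff _ _ _).mpr ⟨i, hk, rfl⟩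
      · have h2 : ((65 : Int) + ((0 : Int) + (i : Int))).toNat = 65 + i := by omega
        rw [hget, h2]
    rw [PySem.Dict.get?_of_mem_items _ hmem (by rw [pv_dict_keys alph hnd]; exact hnd)]
    rfl
  | none =>
    have hcm : c ∉ alph := (PySem.List.index?_eq_none_iff _ _).mp hidx
    simp only [Option.map_none]
    apply (PySem.Dict.get?_eq_none_iff_not_mem_keys _ _).mpr
    rw [pv_dict_keys alph hnd]; exact hcm

theorem pv_dict_contains (alph : List Char) (hnd : alph.Nodup) (c : Char) :
    ((PySem.List.enumerate alph 0).foldl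
        (fun d p => d.insert p.2 (Char.ofNat ((65 : Int) + p.1).toNat)) PySem.Dict.empty).contains c =
      alph.contains c := by
  rw [PySem.Dict.contains_eq_isSome_get?, pv_dict_get alph hnd c, List.contains_eq_mem]
  cases hidx : PySem.List.index? alph c with
  | some i =>
    have hm : c ∈ alph := (PySem.List.index?_isSome_iff _ _).mp (by rw [hidx]; rfl)
    simp [hm]
  | none =>
    have hcm : c ∉ alph := (PySem.List.index?_eq_none_iff _ _).mp hidx
    simp [hcm]

theorem pv_countP_or_disjoint {α : Type} (l : List α) (p q : α → Bool)
    (h : ∀ x ∈ l, ¬(p x = true ∧ q x = true)) :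
    l.countP (fun x => p x || q x) = l.countP p + l.countP q := by
  induction l with
  | nil => simp
  | cons y t ih =>
    have ht : ∀ x ∈ t, ¬(p x = true ∧ q x = true) := fun x hx => h x (List.mem_cons_of_mem y hx)
    have hy := h y (List.mem_cons_self)
    simp only [List.countP_cons, ih ht]
    by_cases hp : p y = true
    · have hq : q y = false := by
        cases hqe : q y
        · rfl
        · exact absurd ⟨hp, hqe⟩ hy
      simp only [hp, hq]
      simp
      omega
    · have hp' : p y = false := by simpa using hp
      simp only [hp']
      by_cases hq : q y = true <;> simp [hq] <;> omega

theorem pv_countP_not {α : Type} (l : List α) (p : α → Bool) :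
    l.countP (fun x => !p x) = l.length - l.countP p := by
  induction l with
  | nil => simp
  | cons y t ih =>
    have hle := List.countP_le_length (p := p) (l := t)
    simp only [List.countP_cons, List.length_cons, ih]
    cases hp : p y <;> simp [hp] <;> omega

-- counting keyword letters below a bound, switched from the range side to the ks side
theorem pv_count_switch (ks : List Char) (hnd : ks.Nodup) (n : Nat) (hn : n ≤ 26) :
    (List.range n).countP (fun k => ks.contains (Char.ofNat (65 + k))) =
      ks.countP (fun x => decide (65 ≤ x.toNat) && decide (x.toNat < 65 + n)) := by
  induction n with
  | zero =>
    simp only [List.range_zero, List.countP_nil]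
    symm
    apply List.countP_eq_zero.mpr
    intro x _
    simp only [Bool.and_eq_true, decide_eq_true_eq, not_and]
    omega
  | succ n ih =>
    have hn' : n ≤ 26 := by omega
    have hsplit : ∀ x : Char, x ∈ ks →
        ((decide (65 ≤ x.toNat) && decide (x.toNat < 65 + (n + 1))) = true ↔
        ((decide (65 ≤ x.toNat) && decide (x.toNat < 65 + n)) || decide (x.toNat = 65 + n)) = true) := by
      intro x _
      simp only [Bool.and_eq_true, Bool.or_eq_true, decide_eq_true_eq]
      omega
    rw [List.countP_congr hsplit,
        pv_countP_or_disjoint _ _ _ (by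
          intro x _ hx
          obtain ⟨h1, h2⟩ := hx
          simp only [Bool.and_eq_true, decide_eq_true_eq] at h1 h2
          omega),
        ← ih hn', List.range_succ, List.countP_append]
    have heq : ks.countP (fun x => decide (x.toNat = 65 + n)) =
        ks.countP (fun x => x == Char.ofNat (65 + n)) := by
      apply List.countP_congr
      intro x _
      have hv : (Char.ofNat (65 + n)).toNat = 65 + n := pv_char_toNat _ (by omega)
      by_cases hx : x = Char.ofNat (65 + n)
      · simp [hx, hv]
      · have hne : x.toNat ≠ 65 + n := by
          intro hc
          apply hx
          rw [← hv] at hc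
          exact Char.ext (UInt32.toNat_inj.mp hc)
        simp [hx, hne]
    rw [heq]
    have hcount : ks.countP (fun x => x == Char.ofNat (65 + n)) =
        if ks.contains (Char.ofNat (65 + n)) then 1 else 0 := by
      rw [← List.count]
      by_cases hm : Char.ofNat (65 + n) ∈ ks
      · rw [List.count_eq_one_of_mem hnd hm]
        simp [List.contains_eq_mem, hm]
      · rw [List.count_eq_zero_of_not_mem hm]
        simp [List.contains_eq_mem, hm]
    rw [hcount]
    simp only [List.countP_cons, List.countP_nil]
    split <;> simp_all

-- index of a member of a strictly increasing list is the number of smaller elements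
theorem pv_index_pairwise (m : List Char) (hp : m.Pairwise (fun a b => a.toNat < b.toNat))
    (c : Char) (hm : c ∈ m) :
    PySem.List.index? m c = some (m.countP (fun x => decide (x.toNat < c.toNat))) := by
  induction m with
  | nil => cases hm
  | cons y t ih =>
    have hyt : ∀ x ∈ t, y.toNat < x.toNat := fun x hx => (List.pairwise_cons.mp hp).1 x hx
    have hpt : t.Pairwise (fun a b => a.toNat < b.toNat) := (List.pairwise_cons.mp hp).2
    by_cases hyc : y = c
    · subst hyc
      rw [PySem.List.index?_cons_self]
      have h0 : (y :: t).countP (fun x => decide (x.toNat < y.toNat)) = 0 := by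
        apply List.countP_eq_zero.mpr
        intro x hx
        simp only [decide_eq_true_eq, not_lt]
        rcases List.mem_cons.mp hx with h | h
        · rw [h]
        · exact le_of_lt (hyt x h)
      rw [h0]
    · have hct : c ∈ t := by
        rcases List.mem_cons.mp hm with h | h
        · exact absurd h.symm hyc
        · exact h
      rw [PySem.List.index?_cons_of_ne t hyc, ih hpt hct]
      have hyltc : y.toNat < c.toNat := hyt c hct
      simp only [Option.map_some, Option.some.injEq, List.countP_cons]
      simp [hyltc]

-- index in an append when the element avoids the left part
theorem pv_index_append_right (ks t : List Char) (c : Char) (hc : c ∉ ks) (j : Nat)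
    (hj : PySem.List.index? t c = some j) :
    PySem.List.index? (ks ++ t) c = some (ks.length + j) := by
  obtain ⟨pre, suf, ht, hlen, hcp⟩ := (PySem.List.index?_eq_some_iff _ _ _).mp hj
  apply (PySem.List.index?_eq_some_iff _ _ _).mpr
  refine ⟨ks ++ pre, suf, by rw [ht, List.append_assoc], by simp [hlen], ?_⟩
  intro hmem
  rcases List.mem_append.mp hmem with h | h
  · exact hc h
  · exact hcp h

-- the pointwise heart: A's dict lookup for one character equals B's index arithmetic
theorem pv_char_eq (ks : List Char) (hnd : ks.Nodup) (c : Char) :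
    (if ((PySem.List.enumerate (ks ++
          ((PySem.List.pyRange 65 91 1).filter (fun i => !ks.contains (Char.ofNat i.toNat))).map
            (fun i => Char.ofNat i.toNat)) 0).foldl
        (fun d p => d.insert p.2 (Char.ofNat ((65 : Int) + p.1).toNat)) PySem.Dict.empty).contains c
     then (((PySem.List.enumerate (ks ++
          ((PySem.List.pyRange 65 91 1).filter (fun i => !ks.contains (Char.ofNat i.toNat))).map
            (fun i => Char.ofNat i.toNat)) 0).foldl
        (fun d p => d.insert p.2 (Char.ofNat ((65 : Int) + p.1).toNat)) PySem.Dict.empty).get? c).getD c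
     else c) =
      (if ks.contains c then Char.ofNat (65 + (PySem.List.index? ks c).getD 0)
       else if 65 ≤ c.toNat ∧ c.toNat ≤ 90 then
         Char.ofNat (65 + ks.length + (c.toNat - 65) -
           ks.countP (fun x => decide (65 ≤ x.toNat) && decide (x.toNat < c.toNat)))
       else c) := by
  have htoNat : ∀ k, k < 26 → (Char.ofNat (65 + k)).toNat = 65 + k :=
    fun k hk => pv_char_toNat _ (by omega)
  have hlpair : ((List.range 26).map (fun k => Char.ofNat (65 + k))).Pairwise
      (fun a b => a.toNat < b.toNat) := by
    rw [List.pairwise_map]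
    apply List.pairwise_iff_getElem.mpr
    intro i j hi hj hij
    simp only [List.length_range] at hi hj
    simp only [List.getElem_range]
    rw [htoNat i hi, htoNat j hj]
    omega
  have hlnd : ((List.range 26).map (fun k => Char.ofNat (65 + k))).Nodup :=
    hlpair.imp (fun {a b} hab => by intro he; rw [he] at hab; omega)
  have hfpair : (((List.range 26).map (fun k => Char.ofNat (65 + k))).filter
      (fun x => !ks.contains x)).Pairwise (fun a b => a.toNat < b.toNat) :=
    List.Pairwise.sublist List.filter_sublist hlpair
  have hfnd : (((List.range 26).map (fun k => Char.ofNat (65 + k))).filter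
      (fun x => !ks.contains x)).Nodup :=
    List.Nodup.sublist List.filter_sublist hlnd
  have hdisj : ∀ x ∈ ks,
      x ∉ ((List.range 26).map (fun k => Char.ofNat (65 + k))).filter (fun x => !ks.contains x) := by
    intro x hxks hxf
    have := List.of_mem_filter hxf
    simp [List.contains_eq_mem, hxks] at this
  have hanodup : (ks ++ ((List.range 26).map (fun k => Char.ofNat (65 + k))).filter
      (fun x => !ks.contains x)).Nodup := List.Nodup.append hnd hfnd hdisj
  rw [pv_letters ks]
  rw [pv_dict_contains _ hanodup c, pv_dict_get _ hanodup c]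
  by_cases hc : ks.contains c = true
  · have hcm : c ∈ ks := by simpa [List.contains_eq_mem] using hc
    obtain ⟨i, hi⟩ := Option.isSome_iff_exists.mp ((PySem.List.index?_isSome_iff _ _).mpr hcm)
    rw [PySem.List.index?_append_of_mem _ hcm, hi]
    -- (RHS's index? ks c also rewritten by hi)
    have hca : (ks ++ ((List.range 26).map (fun k => Char.ofNat (65 + k))).filter
        (fun x => !ks.contains x)).contains c = true :=
      (List.contains_eq_mem c _).trans (decide_eq_true (List.mem_append.mpr (Or.inl hcm)))
    rw [if_pos hca, if_pos hc]
    rfl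
  · have hcnotks : c ∉ ks := by simpa [List.contains_eq_mem] using hc
    rw [if_neg hc]
    by_cases hL : 65 ≤ c.toNat ∧ c.toNat ≤ 90
    · have hn26 : c.toNat - 65 < 26 := by omega
      have hc65 : c.toNat = 65 + (c.toNat - 65) := by omega
      have hcl : c ∈ (List.range 26).map (fun k => Char.ofNat (65 + k)) := by
        apply List.mem_map.mpr
        refine ⟨c.toNat - 65, List.mem_range.mpr hn26, ?_⟩
        rw [← hc65]
        exact pv_ofNat_toNat c (by omega)
      have hcf : c ∈ ((List.range 26).map (fun k => Char.ofNat (65 + k))).filter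
          (fun x => !ks.contains x) :=
        List.mem_filter.mpr ⟨hcl, by simp [List.contains_eq_mem, hcnotks]⟩
      have hjf := pv_index_pairwise _ hfpair c hcf
      rw [pv_index_append_right ks _ c hcnotks _ hjf]
      have hca : (ks ++ ((List.range 26).map (fun k => Char.ofNat (65 + k))).filter
          (fun x => !ks.contains x)).contains c = true :=
        (List.contains_eq_mem c _).trans (decide_eq_true (List.mem_append.mpr (Or.inr hcf)))
      rw [if_pos hca, if_pos hL]
      -- now compute the count
      set n := c.toNat - 65 with hndef
      have hcnt1 : (((List.range 26).map (fun k => Char.ofNat (65 + k))).filter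
            (fun x => !ks.contains x)).countP (fun x => decide (x.toNat < c.toNat)) =
          (List.range 26).countP
            (fun k => decide (k < n) && !ks.contains (Char.ofNat (65 + k))) := by
        rw [List.countP_filter, List.countP_map]
        apply List.countP_congr
        intro k hk
        have hk26 : k < 26 := List.mem_range.mp hk
        simp only [Function.comp_apply, Bool.and_eq_true, decide_eq_true_eq,
          htoNat k hk26]
        constructor
        · rintro ⟨h1, h2⟩; exact ⟨by omega, h2⟩
        · rintro ⟨h1, h2⟩; exact ⟨by omega, h2⟩
      have hcnt2 : (List.range 26).countP
            (fun k => decide (k < n) && !ks.contains (Char.ofNat (65 + k))) =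
          (List.range n).countP (fun k => !ks.contains (Char.ofNat (65 + k))) := by
        have h26 : (26 : Nat) = n + (26 - n) := by omega
        rw [h26, List.range_add, List.countP_append]
        have h2 : ((List.range (26 - n)).map (fun x => n + x)).countP
            (fun k => decide (k < n) && !ks.contains (Char.ofNat (65 + k))) = 0 := by
          apply List.countP_eq_zero.mpr
          intro x hx
          obtain ⟨j, hj, rfl⟩ := List.mem_map.mp hx
          simp only [Bool.and_eq_true, decide_eq_true_eq, not_and]
          intro h; omega
        have h1 : (List.range n).countP
              (fun k => decide (k < n) && !ks.contains (Char.ofNat (65 + k))) =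
            (List.range n).countP (fun k => !ks.contains (Char.ofNat (65 + k))) := by
          apply List.countP_congr
          intro k hk
          have := List.mem_range.mp hk
          simp [this]
        rw [h1, h2]
        omega
      have hcompl : (List.range n).countP (fun k => !ks.contains (Char.ofNat (65 + k))) =
          n - (List.range n).countP (fun k => ks.contains (Char.ofNat (65 + k))) := by
        have h := pv_countP_not (List.range n) (fun k => ks.contains (Char.ofNat (65 + k)))
        rwa [List.length_range] at h
      have hswitch := pv_count_switch ks hnd n (by omega)
      have hBc : ks.countP (fun x => decide (65 ≤ x.toNat) && decide (x.toNat < c.toNat)) =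
          (List.range n).countP (fun k => ks.contains (Char.ofNat (65 + k))) := by
        rw [hswitch, ← hc65]
      have hle : (List.range n).countP (fun k => ks.contains (Char.ofNat (65 + k))) ≤ n := by
        have h := List.countP_le_length
          (p := fun k => ks.contains (Char.ofNat (65 + k))) (l := List.range n)
        rwa [List.length_range] at h
      simp only [Option.map_some, Option.getD_some]
      rw [hcnt1, hcnt2, hcompl, hBc]
      congr 1
      omega
    · have hcna : c ∉ ks ++ ((List.range 26).map (fun k => Char.ofNat (65 + k))).filter
          (fun x => !ks.contains x) := by
        intro hmem
        rcases List.mem_append.mp hmem with h | h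
        · exact hcnotks h
        · have hcl := List.mem_of_mem_filter h
          obtain ⟨k, hk, hck⟩ := List.mem_map.mp hcl
          have hk26 : k < 26 := List.mem_range.mp hk
          apply hL
          rw [← hck, htoNat k hk26]
          omega
      have hca : (ks ++ ((List.range 26).map (fun k => Char.ofNat (65 + k))).filter
          (fun x => !ks.contains x)).contains c = false :=
        (List.contains_eq_mem c _).trans (decide_eq_false hcna)
      rw [if_neg (by rw [hca]; exact Bool.false_ne_true), if_neg hL]

-- ===== VERDICT (by name: the statement is the Claim_ definition above) =====
set_option maxHeartbeats 4000000 in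
theorem decrypt_keyword_spec : Claim_equal_decrypt_keyword := by
  intro text keyword _
  unfold Spec_decrypt_keyword decrypt_keyword decrypt_keyword_alt
  simp only [pv_dedup_eq, pv_loopA_map, pv_loopB_map, List.nil_append]
  exact congrArg String.ofList (List.map_congr_left (fun c _ =>
    pv_char_eq (PySem.List.dedup (PySem.Str.upper keyword).toList)
      (PySem.List.nodup_dedup _) c))
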